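-- pv_equiv track=rewrite | github.com/Dimitar0528/Crawlitics | python-backend/helpers/crawler_helpers.py | filter_urls_by_query_relaxed
-- ===== SOURCE A (Python) =====
-- def filter_urls_by_query_relaxed(urls: list[str], query: str) -> list[str]:
--     """Filters a list of URLs to ensure all parts of the query are present in the URL path."""
--     query_tokens = [token for token in query.lower().split() if token]
--     if not query_tokens:
--         return urls
--
--     filtered_urls = []
--     for url in urls:
--         # Check against a normalized version of the URL
--         url_path = url.lower().replace('-', ' ').replace('_', ' ')
--         if all(token in url_path for token in query_tokens):
--             filtered_urls.append(url)
--     return filtered_urls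
-- ===== SOURCE B (Python) =====
-- def filter_urls_by_query_relaxed(urls: list[str], query: str) -> list[str]:
--     """Token-driven filter chain: each query token narrows the surviving candidates."""
--     candidates = list(urls)
--     for token in query.lower().split():
--         candidates = [u for u in candidates
--                       if token in u.lower().replace('-', ' ').replace('_', ' ')]
--     return candidates
-- ===== Notes on version B (the rewrite author's own statement) =====
-- stated objective: alternative
-- what changed: Replaced the single per-URL pass that tests all tokens at once (with an explicit empty-token guard and accumulator list) by a token-driven filter chain that successively narrows the candidate list with one comprehension per token; the empty-query case falls out of the fold instead of being special-cased.
import Mathlib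
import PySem

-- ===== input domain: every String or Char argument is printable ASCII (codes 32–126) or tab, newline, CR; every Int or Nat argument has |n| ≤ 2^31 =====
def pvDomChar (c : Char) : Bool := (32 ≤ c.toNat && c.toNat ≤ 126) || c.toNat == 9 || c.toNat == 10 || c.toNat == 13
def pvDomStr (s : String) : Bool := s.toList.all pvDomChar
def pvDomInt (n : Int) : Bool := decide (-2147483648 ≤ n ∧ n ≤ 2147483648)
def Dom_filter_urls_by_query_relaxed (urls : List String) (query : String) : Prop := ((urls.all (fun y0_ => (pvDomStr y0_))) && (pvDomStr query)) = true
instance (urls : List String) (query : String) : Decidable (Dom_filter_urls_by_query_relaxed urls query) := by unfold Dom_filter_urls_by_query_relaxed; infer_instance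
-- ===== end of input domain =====

-- B replaces A's single per-URL pass testing all tokens by a per-token filter chain (alternative decomposition, same cost).

-- ===== PORT A =====
def pvNorm (url : String) : String :=
  PySem.Str.replace (PySem.Str.replace (PySem.Str.lower url) "-" " ") "_" " "

def filter_urls_by_query_relaxed (urls : List String) (query : String) : List String :=
  let query_tokens := (PySem.Str.split₀ (PySem.Str.lower query)).filter (fun t => decide (t ≠ ""))
  if query_tokens = [] then urls
  else
    urls.foldl (fun filtered_urls url =>
      let url_path := pvNorm url
      if query_tokens.all (fun token => PySem.Str.isIn token url_path)
      then filtered_urls ++ [url] else filtered_urls) []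

-- ===== PORT B =====
def filter_urls_by_query_relaxed_alt (urls : List String) (query : String) : List String :=
  (PySem.Str.split₀ (PySem.Str.lower query)).foldl
    (fun candidates token => candidates.filter (fun u => PySem.Str.isIn token (pvNorm u)))
    urls

-- ===== PRECONDITION & SPEC =====
def Spec_filter_urls_by_query_relaxed (urls : List String) (query : String) (out : List String) : Prop := out = filter_urls_by_query_relaxed_alt urls query
instance (urls : List String) (query : String) (out : List String) : Decidable (Spec_filter_urls_by_query_relaxed urls query out) := by unfold Spec_filter_urls_by_query_relaxed; infer_instance

-- ===== CLAIM (what is proved, stated in full; the proofs are below) =====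
def Claim_equal_filter_urls_by_query_relaxed : Prop := ∀ (urls : List String) (query : String), Dom_filter_urls_by_query_relaxed urls query → Spec_filter_urls_by_query_relaxed urls query (filter_urls_by_query_relaxed urls query)

-- ===== LEMMAS AND PROOFS =====

-- the empty token is a substring of everything
theorem pv_isIn_empty (s : String) : PySem.Str.isIn "" s = true := by
  simp [PySem.Str.isIn, PySem.Chars.isIn_nil]

-- successively filtering by each token = one filter by the conjunction of all tokens
theorem pv_foldl_filter (toks : List String) (urls : List String) :
    toks.foldl (fun c t => c.filter (fun u => PySem.Str.isIn t (pvNorm u))) urls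
      = urls.filter (fun u => toks.all (fun t => PySem.Str.isIn t (pvNorm u))) := by
  induction toks generalizing urls with
  | nil => simp
  | cons t ts ih =>
      rw [List.foldl_cons, ih, List.filter_filter]
      apply List.filter_congr
      intro u _
      rw [List.all_cons, Bool.and_comm]

-- empty tokens never reject a URL, so filtering them out of the token list changes nothing
theorem pv_all_filter_ne (toks : List String) (u : String) :
    (toks.filter (fun t => decide (t ≠ ""))).all (fun t => PySem.Str.isIn t (pvNorm u))
      = toks.all (fun t => PySem.Str.isIn t (pvNorm u)) := by
  induction toks with
  | nil => rfl
  | cons t ts ih =>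
      by_cases h : t = ""
      · subst h
        have hf : List.filter (fun t => decide (t ≠ "")) ("" :: ts)
            = List.filter (fun t => decide (t ≠ "")) ts := by simp
        rw [hf, ih, List.all_cons, pv_isIn_empty, Bool.true_and]
      · have hf : List.filter (fun t => decide (t ≠ "")) (t :: ts)
            = t :: List.filter (fun t => decide (t ≠ "")) ts := by simp [h]
        rw [hf, List.all_cons, List.all_cons, ih]

theorem pv_all_of_filter_nil (toks : List String)
    (h : toks.filter (fun t => decide (t ≠ "")) = []) (u : String) :
    toks.all (fun t => PySem.Str.isIn t (pvNorm u)) = true := by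
  rw [← pv_all_filter_ne, h]; rfl

-- ===== VERDICT (by name: the statement is the Claim_ definition above) =====
theorem filter_urls_by_query_relaxed_spec : Claim_equal_filter_urls_by_query_relaxed := by
  intro urls query _
  unfold Spec_filter_urls_by_query_relaxed filter_urls_by_query_relaxed filter_urls_by_query_relaxed_alt
  rw [pv_foldl_filter]
  by_cases h : (PySem.Str.split₀ (PySem.Str.lower query)).filter (fun t => decide (t ≠ "")) = []
  · simp only [h]
    exact (List.filter_eq_self.mpr (fun u _ => pv_all_of_filter_nil _ h u)).symm
  · simp only [if_neg h]
    rw [PySem.List.foldl_append_if_eq_filter]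
    simp only [List.nil_append]
    apply List.filter_congr
    intro u _
    exact pv_all_filter_ne _ u
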